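-- pv_equiv track=rewrite | github.com/GeraldineDiaz02/corte2_99415 | primerpunto_tarea3.py | encontrar_max_min
-- ===== SOURCE A (Python) =====
-- def encontrar_max_min(matriz):
--     maximo = matriz[0][0]
--     minimo = matriz[0][0]
--     max_fila = 0
--     max_columna = 0
--     min_fila = 0
--     min_columna = 0
--     for i in range(len(matriz)):
--         for j in range(len(matriz[i])):
--             if matriz[i][j] > maximo:
--                 maximo = matriz[i][j]
--                 max_fila = i
--                 max_columna = j
--             if matriz[i][j] < minimo:
--                 minimo = matriz[i][j]
--                 min_fila = i
--                 min_columna = j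
--     return (maximo, minimo, max_fila, max_columna, min_fila, min_columna)
-- ===== SOURCE B (Python) =====
-- def encontrar_max_min(matriz):
--     celdas = [(v, i, j) for i, fila in enumerate(matriz) for j, v in enumerate(fila)]
--     maximo, max_fila, max_columna = max(celdas, key=lambda c: c[0])
--     minimo, min_fila, min_columna = min(celdas, key=lambda c: c[0])
--     return (maximo, minimo, max_fila, max_columna, min_fila, min_columna)
-- ===== Notes on version B (the rewrite author's own statement) =====
-- stated objective: idiomatic
-- what changed: Replaced the index-driven nested loops with running best-so-far state by a flat enumerate comprehension of (value,row,col) cells and two calls to max/min with a key, whose first-wins tie rule matches A's strict comparisons.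
import Mathlib
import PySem

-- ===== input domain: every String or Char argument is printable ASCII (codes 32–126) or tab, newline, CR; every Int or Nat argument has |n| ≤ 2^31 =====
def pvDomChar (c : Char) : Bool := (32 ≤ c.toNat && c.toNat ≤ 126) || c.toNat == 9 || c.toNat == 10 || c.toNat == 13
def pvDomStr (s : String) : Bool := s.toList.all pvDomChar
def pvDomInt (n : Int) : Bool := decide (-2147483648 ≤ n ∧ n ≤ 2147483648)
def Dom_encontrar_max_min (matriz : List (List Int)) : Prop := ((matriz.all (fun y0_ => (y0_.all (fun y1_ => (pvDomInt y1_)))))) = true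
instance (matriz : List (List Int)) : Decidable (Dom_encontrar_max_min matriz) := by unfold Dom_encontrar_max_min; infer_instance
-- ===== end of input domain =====

-- B replaces A's index-driven nested loops and six running variables by an enumerate
-- comprehension of (value, row, col) cells and two key-based max/min calls (idiomatic, same cost).

-- ===== PORT A =====
-- step of A's inner loop body: state (maximo, minimo, max_fila, max_columna, min_fila, min_columna)
def pvStepA (st : Int × Int × Int × Int × Int × Int) (i j v : Int) :
    Int × Int × Int × Int × Int × Int :=
  let st1 := if v > st.1 then (v, st.2.1, i, j, st.2.2.2.2.1, st.2.2.2.2.2) else st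
  if v < st1.2.1 then (st1.1, v, st1.2.2.1, st1.2.2.2.1, i, j) else st1

def encontrar_max_min (matriz : List (List Int)) : Int × Int × Int × Int × Int × Int :=
  -- matriz[0][0]: pyGetD with default; Pre_ guarantees the index is in range (else Python raises IndexError)
  let m00 := PySem.List.pyGetD (PySem.List.pyGetD matriz 0 []) 0 0
  (PySem.List.pyRange 0 matriz.length 1).foldl
    (fun st i =>
      (PySem.List.pyRange 0 (PySem.List.pyGetD matriz i []).length 1).foldl
        (fun st j => pvStepA st i j (PySem.List.pyGetD (PySem.List.pyGetD matriz i []) j 0))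
        st)
    (m00, m00, 0, 0, 0, 0)

-- ===== PORT B =====
def pvCells (matriz : List (List Int)) : List (Int × Int × Int) :=
  (PySem.List.enumerate matriz).flatMap
    (fun p => (PySem.List.enumerate p.2).map (fun q => (q.2, p.1, q.1)))

def encontrar_max_min_alt (matriz : List (List Int)) : Int × Int × Int × Int × Int × Int :=
  let celdas := pvCells matriz
  match PySem.List.max? celdas (fun c => c.1), PySem.List.min? celdas (fun c => c.1) with
  | some mx, some mn => (mx.1, mn.1, mx.2.1, mx.2.2, mn.2.1, mn.2.2)
  | _, _ => (0, 0, 0, 0, 0, 0)   -- unreachable under Pre_ (Python max/min raise ValueError on an empty sequence)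

-- ===== PRECONDITION & SPEC =====
-- Pre_ excludes exactly the inputs on which A raises IndexError at matriz[0][0]: an empty matrix or an empty first row.
def Pre_encontrar_max_min (matriz : List (List Int)) : Prop :=
  matriz ≠ [] ∧ matriz.headD [] ≠ []
instance (matriz : List (List Int)) : Decidable (Pre_encontrar_max_min matriz) := by
  unfold Pre_encontrar_max_min; infer_instance

def pvWitness_encontrar_max_min : List (List Int) := [[3, -1], [7, 7, 0]]

def Spec_encontrar_max_min (matriz : List (List Int)) (out : Int × Int × Int × Int × Int × Int) : Prop := out = encontrar_max_min_alt matriz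
instance (matriz : List (List Int)) (out : Int × Int × Int × Int × Int × Int) : Decidable (Spec_encontrar_max_min matriz out) := by unfold Spec_encontrar_max_min; infer_instance

-- ===== CLAIM (what is proved, stated in full; the proofs are below) =====
def Claim_equal_encontrar_max_min : Prop := ∀ (matriz : List (List Int)), Dom_encontrar_max_min matriz → Pre_encontrar_max_min matriz → Spec_encontrar_max_min matriz (encontrar_max_min matriz)

-- ===== LEMMAS AND PROOFS =====

-- strict-fold forms of Python's first-wins max/min with a key
def pvFMax (c : Int × Int × Int) (t : List (Int × Int × Int)) : Int × Int × Int :=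
  t.foldl (fun b x => if b.1 < x.1 then x else b) c
def pvFMin (c : Int × Int × Int) (t : List (Int × Int × Int)) : Int × Int × Int :=
  t.foldl (fun b x => if x.1 < b.1 then x else b) c

lemma max?_cons_eq_fold (c : Int × Int × Int) (t : List (Int × Int × Int)) :
    PySem.List.max? (c :: t) (fun x => x.1) = some (pvFMax c t) := by
  show List.foldl _ (some c) t = _
  unfold pvFMax
  induction t generalizing c with
  | nil => rfl
  | cons x t ih => simp only [List.foldl_cons]; split <;> exact ih _

lemma min?_cons_eq_fold (c : Int × Int × Int) (t : List (Int × Int × Int)) :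
    PySem.List.min? (c :: t) (fun x => x.1) = some (pvFMin c t) := by
  show List.foldl _ (some c) t = _
  unfold pvFMin
  induction t generalizing c with
  | nil => rfl
  | cons x t ih => simp only [List.foldl_cons]; split <;> exact ih _

def pvPack (mx mn : Int × Int × Int) : Int × Int × Int × Int × Int × Int :=
  (mx.1, mn.1, mx.2.1, mx.2.2, mn.2.1, mn.2.2)

lemma stepA_pack (mx mn : Int × Int × Int) (c : Int × Int × Int) :
    pvStepA (pvPack mx mn) c.2.1 c.2.2 c.1 =
      pvPack (if mx.1 < c.1 then c else mx) (if c.1 < mn.1 then c else mn) := by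
  obtain ⟨v, i, j⟩ := c
  obtain ⟨a, b, d⟩ := mx
  obtain ⟨e, f, g⟩ := mn
  simp only [pvStepA, pvPack, gt_iff_lt]
  by_cases h1 : a < v <;> by_cases h2 : v < e <;> simp [h1, h2]

lemma foldA_pack (t : List (Int × Int × Int)) (mx mn : Int × Int × Int) :
    t.foldl (fun st c => pvStepA st c.2.1 c.2.2 c.1) (pvPack mx mn) =
      pvPack (pvFMax mx t) (pvFMin mn t) := by
  induction t generalizing mx mn with
  | nil => rfl
  | cons c t ih =>
    simp only [List.foldl_cons, stepA_pack, pvFMax, pvFMin]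
    exact ih _ _

-- A's nested index loops are the single fold of pvStepA over the row-major cell list
lemma loopA_eq_foldl_cells (matriz : List (List Int)) (init : Int × Int × Int × Int × Int × Int) :
    (PySem.List.pyRange 0 matriz.length 1).foldl
      (fun st i =>
        (PySem.List.pyRange 0 (PySem.List.pyGetD matriz i []).length 1).foldl
          (fun st j => pvStepA st i j (PySem.List.pyGetD (PySem.List.pyGetD matriz i []) j 0))
          st)
      init
    = (pvCells matriz).foldl (fun st c => pvStepA st c.2.1 c.2.2 c.1) init := by
  unfold pvCells
  rw [List.foldl_flatMap]
  rw [PySem.List.enumerate_eq_map_pyRange matriz [], List.foldl_map]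
  show List.foldl _ init (PySem.List.pyRange 0 (PySem.List.len matriz) 1) = _
  unfold PySem.List.len
  congr 1
  funext st i
  rw [PySem.List.enumerate_eq_map_pyRange (PySem.List.pyGetD matriz i []) 0, List.foldl_map,
    List.foldl_map]
  rfl

-- ===== VERDICT (by name: the statement is the Claim_ definition above) =====
theorem encontrar_max_min_spec : Claim_equal_encontrar_max_min := by
  intro matriz _ hpre
  obtain ⟨hne, hrow⟩ := hpre
  cases matriz with
  | nil => exact absurd rfl hne
  | cons r0 rs =>
  cases r0 with
  | nil => exact absurd rfl hrow
  | cons v0 vs =>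
  show encontrar_max_min _ = encontrar_max_min_alt _
  have hcells : pvCells ((v0 :: vs) :: rs) = (v0, 0, 0) :: ((PySem.List.enumerate vs 1).map
      (fun q => (q.2, (0 : Int), q.1)) ++ (PySem.List.enumerate rs 1).flatMap
      (fun p => (PySem.List.enumerate p.2).map (fun q => (q.2, p.1, q.1)))) := by
    simp [pvCells, PySem.List.enumerate_cons]
  unfold encontrar_max_min encontrar_max_min_alt
  rw [loopA_eq_foldl_cells]
  rw [hcells]
  simp only [List.foldl_cons]
  have h00 : PySem.List.pyGetD (PySem.List.pyGetD ((v0 :: vs) :: rs) 0 []) 0 0 = v0 := by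
    simp [PySem.List.pyGetD, PySem.List.pyGet?, PySem.List.pyIdx?]
  rw [h00]
  have hfirst : pvStepA (v0, v0, 0, 0, 0, 0) 0 0 v0 = pvPack (v0, 0, 0) (v0, 0, 0) := by
    simp [pvStepA, pvPack]
  rw [hfirst, foldA_pack]
  rw [max?_cons_eq_fold, min?_cons_eq_fold]
  rfl
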